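-- pv_equiv track=rewrite | github.com/Vcaudill/Sim | ThreeAlleles.py | icount
-- ===== SOURCE A (Python) =====
-- def icount(newgeneration):
--     count0 = 0
--     count1 = 0
--     count2 = 0
--     for i in newgeneration:
--         if newgeneration[i] == [0, 0]:
--             count0 = count0 + 2
--         if newgeneration[i] == [0, 1] or newgeneration[i] == [1, 0]:
--             count0 = count0 + 1
--             count1 = count1 + 1
--         if newgeneration[i] == [1, 1]:
--             count1 = count1 + 2
--         if newgeneration[i] == [2, 2]:
--             count2 = count2 + 2
--         if newgeneration[i] == [0, 2] or newgeneration[i] == [2, 0]: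
--             count0 = count0 + 1
--             count2 = count2 + 1
--         if newgeneration[i] == [2, 1] or newgeneration[i] == [1, 2]:
--             count2 = count2 + 1
--             count1 = count1 + 1
--     return count0, count1, count2
-- ===== SOURCE B (Python) =====
-- def icount(newgeneration):
--     count0 = count1 = count2 = 0
--     for pair in newgeneration.values():
--         if len(pair) == 2 and all(a in (0, 1, 2) for a in pair):
--             x, y = pair
--             count0 += (x == 0) + (y == 0)
--             count1 += (x == 1) + (y == 1)
--             count2 += (x == 2) + (y == 2)
--     return count0, count1, count2
-- ===== Notes on version B (the rewrite author's own statement) =====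
-- stated objective: simpler
-- what changed: Replaces the nine whole-pair equality branches (each iteration looking the key up in the dict five times) by a single per-allele tally over the dict's values, guarded by one validity check.
import Mathlib
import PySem

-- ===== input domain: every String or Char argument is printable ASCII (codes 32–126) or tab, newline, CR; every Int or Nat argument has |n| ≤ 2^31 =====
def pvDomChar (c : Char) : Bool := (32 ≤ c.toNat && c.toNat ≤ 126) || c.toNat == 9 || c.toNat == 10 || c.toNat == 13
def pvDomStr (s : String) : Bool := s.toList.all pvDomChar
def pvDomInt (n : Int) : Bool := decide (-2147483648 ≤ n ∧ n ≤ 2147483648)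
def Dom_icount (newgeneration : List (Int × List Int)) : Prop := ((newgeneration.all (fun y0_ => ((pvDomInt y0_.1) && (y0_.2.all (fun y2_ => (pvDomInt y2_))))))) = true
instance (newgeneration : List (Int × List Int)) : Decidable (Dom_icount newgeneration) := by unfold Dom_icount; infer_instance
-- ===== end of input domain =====

-- B replaces A's nine whole-pair equality branches by a guarded per-allele tally over the dict's values; same O(n) cost, simpler.


-- ===== PORT A =====
-- Body of A's loop: the nine equality tests on v = newgeneration[i], in order.
def icountStepA (acc : Int × Int × Int) (v : List Int) : Int × Int × Int :=
  let c0 := acc.1; let c1 := acc.2.1; let c2 := acc.2.2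
  let c0 := if v = [0, 0] then c0 + 2 else c0
  let (c0, c1) := if v = [0, 1] ∨ v = [1, 0] then (c0 + 1, c1 + 1) else (c0, c1)
  let c1 := if v = [1, 1] then c1 + 2 else c1
  let c2 := if v = [2, 2] then c2 + 2 else c2
  let (c0, c2) := if v = [0, 2] ∨ v = [2, 0] then (c0 + 1, c2 + 1) else (c0, c2)
  let (c2, c1) := if v = [2, 1] ∨ v = [1, 2] then (c2 + 1, c1 + 1) else (c2, c1)
  (c0, c1, c2)

-- 'for i in newgeneration' iterates the dict's keys; 'newgeneration[i]' looks the key up in the dict.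
def icount (newgeneration : List (Int × List Int)) : Int × Int × Int :=
  let d := PySem.Dict.ofList newgeneration
  d.keys.foldl (fun acc i => icountStepA acc (d.getD i [])) (0, 0, 0)

-- ===== PORT B =====
def icountTally (acc : Int × Int × Int) (v : List Int) : Int × Int × Int :=
  match v with
  | [x, y] =>
    if (x = 0 ∨ x = 1 ∨ x = 2) ∧ (y = 0 ∨ y = 1 ∨ y = 2) then
      (acc.1 + (if x = 0 then 1 else 0) + (if y = 0 then 1 else 0),
       acc.2.1 + (if x = 1 then 1 else 0) + (if y = 1 then 1 else 0),
       acc.2.2 + (if x = 2 then 1 else 0) + (if y = 2 then 1 else 0))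
    else acc
  | _ => acc

def icount_alt (newgeneration : List (Int × List Int)) : Int × Int × Int :=
  (PySem.Dict.ofList newgeneration).values.foldl icountTally (0, 0, 0)

-- ===== PRECONDITION & SPEC =====
def Spec_icount (newgeneration : List (Int × List Int)) (out : Int × Int × Int) : Prop := out = icount_alt newgeneration
instance (newgeneration : List (Int × List Int)) (out : Int × Int × Int) : Decidable (Spec_icount newgeneration out) := by unfold Spec_icount; infer_instance

-- ===== CLAIM (what is proved, stated in full; the proofs are below) =====
def Claim_equal_icount : Prop := ∀ (newgeneration : List (Int × List Int)), Dom_icount newgeneration → Spec_icount newgeneration (icount newgeneration)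

-- ===== LEMMAS AND PROOFS =====

-- The per-element bodies of the two loops compute the same update.
theorem icountStep_eq (acc : Int × Int × Int) (v : List Int) :
    icountStepA acc v = icountTally acc v := by
  rcases v with _ | ⟨x, _ | ⟨y, _ | ⟨z, rest⟩⟩⟩
  · simp [icountStepA, icountTally]
  · simp [icountStepA, icountTally]
  · by_cases hx0 : x = 0 <;> by_cases hx1 : x = 1 <;> by_cases hx2 : x = 2 <;>
      by_cases hy0 : y = 0 <;> by_cases hy1 : y = 1 <;> by_cases hy2 : y = 2 <;>
      simp_all [icountStepA, icountTally] <;> omega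
  · simp [icountStepA, icountTally]

-- Looking each key of a dict back up yields exactly the values list.
theorem map_getD_keys (d : PySem.Dict Int (List Int)) (h : d.keys.Nodup) :
    d.keys.map (fun k => d.getD k []) = d.values := by
  simp only [PySem.Dict.keys, PySem.Dict.values, List.map_map]
  refine List.map_congr_left (fun p hp => ?_)
  exact PySem.Dict.getD_of_mem_items d hp h []

-- ===== VERDICT (by name: the statement is the Claim_ definition above) =====
theorem icount_spec : Claim_equal_icount := by
  intro n _
  show icount n = icount_alt n
  unfold icount icount_alt
  show List.foldl (fun acc i => icountStepA acc ((PySem.Dict.ofList n).getD i [])) (0, 0, 0)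
      (PySem.Dict.ofList n).keys = List.foldl icountTally (0, 0, 0) (PySem.Dict.ofList n).values
  rw [show (fun acc i => icountStepA acc ((PySem.Dict.ofList n).getD i []))
      = (fun acc i => icountTally acc ((PySem.Dict.ofList n).getD i []))
    from funext fun acc => funext fun i => icountStep_eq acc _,
    ← List.foldl_map (f := fun i => (PySem.Dict.ofList n).getD i []) (g := icountTally),
    map_getD_keys _ (PySem.Dict.nodup_keys_ofList n)]
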